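-- pv_equiv track=rewrite | github.com/DJV512/Advent-of-Code-2018 | Day5/main.py | react_suit
-- ===== SOURCE A (Python) =====
-- def react_suit(suit):
--     stack = []
--     for char in suit:
--         if stack and abs(ord(stack[-1]) - ord(char)) == 32:
--             stack.pop()
--         else:
--             stack.append(char)
--     return ''.join(stack)
-- ===== SOURCE B (Python) =====
-- def react_suit(suit):
--     def cancel_first(s):
--         # return s with the leftmost canceling adjacent pair removed, or None if none
--         for i in range(len(s) - 1):
--             if abs(ord(s[i]) - ord(s[i + 1])) == 32:
--                 return s[:i] + s[i + 2:]
--         return None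
--
--     s = suit
--     while True:
--         t = cancel_first(s)
--         if t is None:
--             return s
--         s = t
-- ===== Notes on version B (the rewrite author's own statement) =====
-- stated objective: alternative
-- what changed: A's single O(n) stack pass is replaced by a fixpoint loop that repeatedly scans the current string and deletes the leftmost adjacent pair whose ord-difference is 32 until no such pair remains.
import Mathlib
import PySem

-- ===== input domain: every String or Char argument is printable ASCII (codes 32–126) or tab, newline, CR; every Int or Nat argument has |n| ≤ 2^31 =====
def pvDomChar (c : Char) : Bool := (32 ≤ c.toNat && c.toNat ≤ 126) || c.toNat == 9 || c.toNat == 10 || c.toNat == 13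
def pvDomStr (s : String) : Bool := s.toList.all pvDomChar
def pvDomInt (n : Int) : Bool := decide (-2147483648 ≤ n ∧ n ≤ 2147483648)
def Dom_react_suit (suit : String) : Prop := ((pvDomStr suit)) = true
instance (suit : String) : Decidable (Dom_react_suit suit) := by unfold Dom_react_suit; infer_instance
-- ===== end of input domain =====

-- B replaces A's single stack pass by repeatedly deleting the leftmost canceling
-- adjacent pair until none remains (objective: alternative; B is not faster).

-- shared helper: Python's `abs(ord(x) - ord(y)) == 32`
def pvCancel (x y : Char) : Bool := ((x.toNat : Int) - (y.toNat : Int)).natAbs == 32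

-- ===== PORT A =====
-- one loop iteration of A's `for char in suit` over the stack
def reactStep (stack : List Char) (char : Char) : List Char :=
  match stack.getLast? with
  | some top => if pvCancel top char then stack.dropLast else stack ++ [char]
  | none => stack ++ [char]

def react_suit (suit : String) : String :=
  String.mk (suit.toList.foldl reactStep [])

-- ===== PORT B =====
-- `cancel_first`: the string with the leftmost canceling adjacent pair removed, or none
def cancelFirst : List Char → Option (List Char)
  | a :: b :: t =>
      if pvCancel a b then some t
      else (cancelFirst (b :: t)).map (a :: ·)
  | _ => none

theorem cancelFirst_length {l m : List Char} (h : cancelFirst l = some m) :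
    m.length < l.length := by
  induction l generalizing m with
  | nil => simp [cancelFirst] at h
  | cons a t ih =>
    match t with
    | [] => simp [cancelFirst] at h
    | b :: t' =>
      by_cases hc : pvCancel a b = true
      · simp [cancelFirst, hc] at h; subst h; simp
      · simp [cancelFirst, hc] at h
        obtain ⟨m', hm', rfl⟩ := h
        have := ih hm'
        simp at this ⊢; omega

-- B's `while True` loop
def reactLoop (l : List Char) : List Char :=
  match h : cancelFirst l with
  | some t => reactLoop t
  | none => l
termination_by l.length
decreasing_by exact cancelFirst_length h

def react_suit_alt (suit : String) : String :=
  String.mk (reactLoop suit.toList)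

-- ===== PRECONDITION & SPEC =====
def Spec_react_suit (suit : String) (out : String) : Prop := out = react_suit_alt suit
instance (suit : String) (out : String) : Decidable (Spec_react_suit suit out) := by unfold Spec_react_suit; infer_instance

-- ===== CLAIM (what is proved, stated in full; the proofs are below) =====
def Claim_equal_react_suit : Prop := ∀ (suit : String), Dom_react_suit suit → Spec_react_suit suit (react_suit suit)

-- ===== LEMMAS AND PROOFS =====

-- a list is "reduced" when no adjacent pair cancels
def Reduced (l : List Char) : Prop := List.IsChain (fun a b => pvCancel a b = false) l

-- A's fold leaves a reduced string alone
theorem foldl_reduced (acc q : List Char) (h : Reduced (acc ++ q)) :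
    q.foldl reactStep acc = acc ++ q := by
  induction q generalizing acc with
  | nil => simp
  | cons c q' ih =>
    have hstep : reactStep acc c = acc ++ [c] := by
      unfold reactStep
      match hl : acc.getLast? with
      | none => simp
      | some top =>
        have hmem : pvCancel top c = false := by
          rcases List.isChain_append.mp h with ⟨_, _, hb⟩
          exact hb top hl c (by simp)
        simp [hmem]
    rw [List.foldl_cons, hstep, ih (acc ++ [c]) (by simpa using h)]
    simp

-- if cancelFirst fires nowhere, the list is reduced
theorem cancelFirst_none_reduced (l : List Char) (h : cancelFirst l = none) : Reduced l := by
  induction l with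
  | nil => exact List.isChain_nil
  | cons a t ih =>
    match t with
    | [] => exact List.isChain_singleton a
    | b :: t' =>
      by_cases hc : pvCancel a b = true
      · simp [cancelFirst, hc] at h
      · simp [cancelFirst, hc] at h
        exact List.isChain_cons_cons.mpr ⟨by simpa using hc, ih h⟩

-- a successful cancelFirst decomposes the list: the prefix up to and including the
-- first pair's left element is reduced, the pair cancels, and the pair is removed
theorem cancelFirst_decomp {l m : List Char} (h : cancelFirst l = some m) :
    ∃ p a b t, l = p ++ a :: b :: t ∧ m = p ++ t ∧ pvCancel a b = true ∧
      Reduced (p ++ [a]) := by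
  induction l generalizing m with
  | nil => simp [cancelFirst] at h
  | cons x t ih =>
    match t with
    | [] => simp [cancelFirst] at h
    | b :: t' =>
      by_cases hc : pvCancel x b = true
      · refine ⟨[], x, b, t', by simp, ?_, hc, List.isChain_singleton x⟩
        simp [cancelFirst, hc] at h; simp [h]
      · simp [cancelFirst, hc] at h
        obtain ⟨m', hm', rfl⟩ := h
        obtain ⟨p, a, b', t'', hdec, hm, hcan, hred⟩ := ih hm'
        refine ⟨x :: p, a, b', t'', by simp [hdec], by simp [hm], hcan, ?_⟩
        match p with
        | [] =>
          have ha : b = a := by simpa using congrArg List.head? hdec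
          exact List.isChain_pair.mpr (by simp [← ha]; simpa using hc)
        | y :: p' =>
          have hy : b = y := by simpa using congrArg List.head? hdec
          exact List.isChain_cons_cons.mpr ⟨by simp [← hy]; simpa using hc, by simpa using hred⟩

-- one B-deletion does not change A's fold result
theorem foldl_cancelFirst {l m : List Char} (h : cancelFirst l = some m) :
    l.foldl reactStep [] = m.foldl reactStep [] := by
  obtain ⟨p, a, b, t, rfl, rfl, hcan, hred⟩ := cancelFirst_decomp h
  have hp : Reduced p := (List.isChain_append.mp hred).1
  have h1 : (p ++ a :: b :: t) = (p ++ [a]) ++ b :: t := by simp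
  rw [h1, List.foldl_append, foldl_reduced [] (p ++ [a]) (by simpa using hred)]
  rw [List.foldl_append, foldl_reduced [] p (by simpa using hp)]
  have hstep : reactStep (p ++ [a]) b = p := by
    unfold reactStep
    simp [hcan]
  simp [hstep]

-- B's loop computes A's fold
theorem reactLoop_eq (l : List Char) : reactLoop l = l.foldl reactStep [] := by
  induction l using reactLoop.induct with
  | case1 l t h ih =>
    rw [reactLoop]; split
    · rename_i t' h'
      rw [h] at h'; cases h'; rw [ih, foldl_cancelFirst h]
    · rename_i h'
      rw [h'] at h; cases h
  | case2 l h =>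
    rw [reactLoop]; split
    · rename_i t' h'
      rw [h] at h'; cases h'
    · exact (foldl_reduced [] l (by simpa using cancelFirst_none_reduced l h)).symm

-- ===== VERDICT (by name: the statement is the Claim_ definition above) =====
theorem react_suit_spec : Claim_equal_react_suit := by
  intro suit _
  unfold Spec_react_suit react_suit react_suit_alt
  rw [reactLoop_eq]
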